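-- pv_equiv track=rewrite | github.com/openguardrails/openguardrails-safety | backend/services/detection_guardrail_service.py | _get_highest_risk_level
-- ===== SOURCE A (Python) =====
-- from typing import List, Dict, Tuple, Optional, Union, Any
--
-- RISK_LEVEL_MAPPING = {
--     'S2': 'high_risk',   # Sensitive Political Topics
--     'S3': 'high_risk',   # Insult to National Symbols or Leaders
--     'S5': 'high_risk',   # Violent Crime
--     'S9': 'high_risk',   # Prompt Attacks
--     'S15': 'high_risk',  # Weapons of Mass Destruction
--     'S17': 'high_risk',  # Sexual Crimes
--     'S4': 'medium_risk', # Harm to Minors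
--     'S6': 'medium_risk', # Non-Violent Crime
--     'S7': 'medium_risk', # Pornography
--     'S16': 'medium_risk',# Self-Harm
--     'S1': 'low_risk',    # General Political Topics
--     'S8': 'low_risk',    # Hate & Discrimination
--     'S10': 'low_risk',   # Profanity
--     'S11': 'low_risk',   # Privacy Invasion
--     'S12': 'low_risk',   # Commercial Violations
--     'S13': 'low_risk',   # Intellectual Property Infringement
--     'S14': 'low_risk',   # Harassment
--     'S18': 'low_risk',   # Threats
--     'S19': 'low_risk',   # Professional Financial Advice
--     'S20': 'low_risk',   # Professional Medical Advice
--     'S21': 'low_risk',   # Professional Legal Advice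
-- }
--
-- CATEGORY_NAMES = {
--     'S1': 'General Political Topics',
--     'S2': 'Sensitive Political Topics',
--     'S3': 'Insult to National Symbols or Leaders',
--     'S4': 'Harm to Minors',
--     'S5': 'Violent Crime',
--     'S6': 'Non-Violent Crime',
--     'S7': 'Pornography',
--     'S8': 'Hate & Discrimination',
--     'S9': 'Prompt Attacks',
--     'S10': 'Profanity',
--     'S11': 'Privacy Invasion',
--     'S12': 'Commercial Violations',
--     'S13': 'Intellectual Property Infringement',
--     'S14': 'Harassment',
--     'S15': 'Weapons of Mass Destruction',
--     'S16': 'Self-Harm',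
--     'S17': 'Sexual Crimes',
--     'S18': 'Threats',
--     'S19': 'Professional Financial Advice',
--     'S20': 'Professional Medical Advice',
--     'S21': 'Professional Legal Advice',
-- }
--
-- def _get_highest_risk_level(categories: List[str]) -> str:
--     """Get highest risk level"""
--     if not categories:
--         return "no_risk"
--
--     risk_levels = []
--     for category in categories:
--         for code, name in CATEGORY_NAMES.items():
--             if name == category:
--                 risk_levels.append(RISK_LEVEL_MAPPING[code])
--                 break
--
--     if "high_risk" in risk_levels:
--         return "high_risk"
--     elif "medium_risk" in risk_levels:
--         return "medium_risk"
--     elif "low_risk" in risk_levels: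
--         return "low_risk"
--     else:
--         return "no_risk"
-- ===== SOURCE B (Python) =====
-- RISK_LEVEL_MAPPING = {
--     'S2': 'high_risk', 'S3': 'high_risk', 'S5': 'high_risk', 'S9': 'high_risk',
--     'S15': 'high_risk', 'S17': 'high_risk',
--     'S4': 'medium_risk', 'S6': 'medium_risk', 'S7': 'medium_risk', 'S16': 'medium_risk',
--     'S1': 'low_risk', 'S8': 'low_risk', 'S10': 'low_risk', 'S11': 'low_risk',
--     'S12': 'low_risk', 'S13': 'low_risk', 'S14': 'low_risk', 'S18': 'low_risk',
--     'S19': 'low_risk', 'S20': 'low_risk', 'S21': 'low_risk',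
-- }
--
-- CATEGORY_NAMES = {
--     'S1': 'General Political Topics', 'S2': 'Sensitive Political Topics',
--     'S3': 'Insult to National Symbols or Leaders', 'S4': 'Harm to Minors',
--     'S5': 'Violent Crime', 'S6': 'Non-Violent Crime', 'S7': 'Pornography',
--     'S8': 'Hate & Discrimination', 'S9': 'Prompt Attacks', 'S10': 'Profanity',
--     'S11': 'Privacy Invasion', 'S12': 'Commercial Violations',
--     'S13': 'Intellectual Property Infringement', 'S14': 'Harassment',
--     'S15': 'Weapons of Mass Destruction', 'S16': 'Self-Harm', 'S17': 'Sexual Crimes',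
--     'S18': 'Threats', 'S19': 'Professional Financial Advice',
--     'S20': 'Professional Medical Advice', 'S21': 'Professional Legal Advice',
-- }
--
-- _RANK = {'high_risk': 3, 'medium_risk': 2, 'low_risk': 1}
-- _NAME_RANK = {name: _RANK[RISK_LEVEL_MAPPING[code]] for code, name in CATEGORY_NAMES.items()}
-- _LEVELS = ['no_risk', 'low_risk', 'medium_risk', 'high_risk']
--
-- def _get_highest_risk_level(categories):
--     """Get highest risk level"""
--     best = 0
--     for category in categories:
--         best = max(best, _NAME_RANK.get(category, 0))
--     return _LEVELS[best]
-- ===== Notes on version B (the rewrite author's own statement) =====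
-- stated objective: simpler
-- what changed: Replaces the per-category linear scan of CATEGORY_NAMES plus a collected list and three membership tests with a precomputed name-to-severity-rank map and a single-pass running-max fold, mapped back to the level name at the end.
import Mathlib
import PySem

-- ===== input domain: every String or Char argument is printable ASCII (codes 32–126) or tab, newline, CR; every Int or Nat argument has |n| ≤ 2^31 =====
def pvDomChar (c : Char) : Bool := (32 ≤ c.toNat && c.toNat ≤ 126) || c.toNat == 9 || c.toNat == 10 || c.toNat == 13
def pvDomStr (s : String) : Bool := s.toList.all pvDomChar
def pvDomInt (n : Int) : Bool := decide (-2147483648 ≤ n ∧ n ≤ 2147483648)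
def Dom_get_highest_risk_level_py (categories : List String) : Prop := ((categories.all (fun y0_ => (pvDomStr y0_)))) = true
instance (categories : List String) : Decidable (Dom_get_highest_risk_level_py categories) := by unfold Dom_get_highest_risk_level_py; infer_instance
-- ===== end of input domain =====

-- B replaces A's inner scan of CATEGORY_NAMES + collected list + three membership tests
-- by a precomputed name→rank map and a one-pass running-max fold (objective: simpler).

-- ===== PORT A =====
-- RISK_LEVEL_MAPPING as an association list (insertion order)
def riskLevelMapping : List (String × String) :=
  [("S2", "high_risk"), ("S3", "high_risk"), ("S5", "high_risk"), ("S9", "high_risk"),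
   ("S15", "high_risk"), ("S17", "high_risk"),
   ("S4", "medium_risk"), ("S6", "medium_risk"), ("S7", "medium_risk"), ("S16", "medium_risk"),
   ("S1", "low_risk"), ("S8", "low_risk"), ("S10", "low_risk"), ("S11", "low_risk"),
   ("S12", "low_risk"), ("S13", "low_risk"), ("S14", "low_risk"), ("S18", "low_risk"),
   ("S19", "low_risk"), ("S20", "low_risk"), ("S21", "low_risk")]

-- CATEGORY_NAMES as an association list (insertion order)
def categoryNames : List (String × String) :=
  [("S1", "General Political Topics"), ("S2", "Sensitive Political Topics"),
   ("S3", "Insult to National Symbols or Leaders"), ("S4", "Harm to Minors"),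
   ("S5", "Violent Crime"), ("S6", "Non-Violent Crime"), ("S7", "Pornography"),
   ("S8", "Hate & Discrimination"), ("S9", "Prompt Attacks"), ("S10", "Profanity"),
   ("S11", "Privacy Invasion"), ("S12", "Commercial Violations"),
   ("S13", "Intellectual Property Infringement"), ("S14", "Harassment"),
   ("S15", "Weapons of Mass Destruction"), ("S16", "Self-Harm"), ("S17", "Sexual Crimes"),
   ("S18", "Threats"), ("S19", "Professional Financial Advice"),
   ("S20", "Professional Medical Advice"), ("S21", "Professional Legal Advice")]

-- RISK_LEVEL_MAPPING[code]; the key is always present, so the "" default is never used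
def riskOf (code : String) : String := (riskLevelMapping.lookup code).getD ""

-- the inner 'for code, name in CATEGORY_NAMES.items(): if name == category: … break' loop:
-- first matching entry's risk level, none if no name matches
def innerScan : List (String × String) → String → Option String
  | [], _ => none
  | (code, name) :: rest, category =>
      if name == category then some (riskOf code) else innerScan rest category

def get_highest_risk_level_py (categories : List String) : String :=
  if categories = [] then "no_risk"
  else
    let risk_levels := categories.foldl (fun acc category =>
      match innerScan categoryNames category with
      | some r => acc ++ [r]
      | none => acc) []
    if risk_levels.contains "high_risk" then "high_risk"
    else if risk_levels.contains "medium_risk" then "medium_risk"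
    else if risk_levels.contains "low_risk" then "low_risk"
    else "no_risk"

-- ===== PORT B =====
-- _NAME_RANK: category name → severity rank, in CATEGORY_NAMES order
def nameRankList : List (String × Nat) :=
  [("General Political Topics", 1), ("Sensitive Political Topics", 3),
   ("Insult to National Symbols or Leaders", 3), ("Harm to Minors", 2),
   ("Violent Crime", 3), ("Non-Violent Crime", 2), ("Pornography", 2),
   ("Hate & Discrimination", 1), ("Prompt Attacks", 3), ("Profanity", 1),
   ("Privacy Invasion", 1), ("Commercial Violations", 1),
   ("Intellectual Property Infringement", 1), ("Harassment", 1),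
   ("Weapons of Mass Destruction", 3), ("Self-Harm", 2), ("Sexual Crimes", 3),
   ("Threats", 1), ("Professional Financial Advice", 1),
   ("Professional Medical Advice", 1), ("Professional Legal Advice", 1)]

-- first-match association-list get, as a dict lookup: _NAME_RANK.get(category, …)
def assocGet : List (String × Nat) → String → Option Nat
  | [], _ => none
  | (name, r) :: rest, category =>
      if name == category then some r else assocGet rest category

-- _NAME_RANK.get(category, 0)
def rankOf (category : String) : Nat := (assocGet nameRankList category).getD 0

def levelsTable : List String := ["no_risk", "low_risk", "medium_risk", "high_risk"]

def get_highest_risk_level_py_alt (categories : List String) : String :=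
  let best := categories.foldl (fun m category => Nat.max m (rankOf category)) 0
  -- _LEVELS[best]; best ≤ 3 always, so the "" default is never used
  levelsTable.getD best ""

-- ===== PRECONDITION & SPEC =====
def Spec_get_highest_risk_level_py (categories : List String) (out : String) : Prop := out = get_highest_risk_level_py_alt categories
instance (categories : List String) (out : String) : Decidable (Spec_get_highest_risk_level_py categories out) := by unfold Spec_get_highest_risk_level_py; infer_instance

-- ===== CLAIM (what is proved, stated in full; the proofs are below) =====
def Claim_equal_get_highest_risk_level_py : Prop := ∀ (categories : List String), Dom_get_highest_risk_level_py categories → Spec_get_highest_risk_level_py categories (get_highest_risk_level_py categories)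

-- ===== LEMMAS AND PROOFS =====

-- rank n rendered as an optional risk-level string
def rankOpt : Nat → Option String
  | 3 => some "high_risk"
  | 2 => some "medium_risk"
  | 1 => some "low_risk"
  | _ => none

-- generic: if the (code,name) table and the (name,rank) table correspond entrywise,
-- A's first-match scan equals rankOpt of B's first-match lookup
theorem scan_lookup (xs : List (String × String)) (ys : List (String × Nat))
    (h : List.Forall₂ (fun p q => p.2 = q.1 ∧ some (riskOf p.1) = rankOpt q.2) xs ys)
    (c : String) :
    innerScan xs c = rankOpt ((assocGet ys c).getD 0) := by
  induction h with
  | nil => rfl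
  | cons hpq htl ih =>
      rename_i p q xs' ys'
      obtain ⟨code, name⟩ := p
      obtain ⟨name', r⟩ := q
      obtain ⟨hn, hv⟩ := hpq
      simp only at hn hv
      subst hn
      simp only [innerScan, assocGet]
      cases h2 : (name == c)
      · simpa using ih
      · simpa using hv

-- the two literal tables do correspond
theorem tables_correspond :
    List.Forall₂ (fun (p : String × String) (q : String × Nat) =>
      p.2 = q.1 ∧ some (riskOf p.1) = rankOpt q.2) categoryNames nameRankList := by
  decide

-- A's inner scan agrees with B's rank lookup, for every category string
theorem innerScan_eq (c : String) :
    innerScan categoryNames c = rankOpt (rankOf c) := by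
  rw [rankOf]; exact scan_lookup _ _ tables_correspond c

theorem assocGet_le3 (ys : List (String × Nat)) (h : ∀ q ∈ ys, q.2 ≤ 3) (c : String) :
    (assocGet ys c).getD 0 ≤ 3 := by
  induction ys with
  | nil => simp [assocGet]
  | cons q rest ih =>
      obtain ⟨name, r⟩ := q
      simp only [assocGet]
      cases h2 : (name == c)
      · simpa using ih (fun q hq => h q (List.mem_cons_of_mem _ hq))
      · simpa using h (name, r) (List.mem_cons_self ..)

theorem rankOf_le3 (c : String) : rankOf c ≤ 3 :=
  assocGet_le3 nameRankList (by decide) c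

theorem rankOpt_eq_some (n : Nat) (s : String) :
    rankOpt n = some s ↔ (n = 3 ∧ s = "high_risk") ∨ (n = 2 ∧ s = "medium_risk") ∨
      (n = 1 ∧ s = "low_risk") := by
  match n with
  | 0 => simp [rankOpt]
  | 1 => simp [rankOpt, eq_comm]
  | 2 => simp [rankOpt, eq_comm]
  | 3 => simp [rankOpt, eq_comm]
  | (n+4) => simp only [rankOpt]; constructor
             · intro h; cases h
             · rintro (⟨h, _⟩ | ⟨h, _⟩ | ⟨h, _⟩) <;> omega

-- the collected risk_levels list is the filterMap of the inner scan
theorem riskLevels_eq (cats : List String) (acc : List String) :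
    cats.foldl (fun acc category =>
      match innerScan categoryNames category with
      | some r => acc ++ [r]
      | none => acc) acc = acc ++ cats.filterMap (fun c => innerScan categoryNames c) := by
  induction cats generalizing acc with
  | nil => simp
  | cons c rest ih =>
      simp only [List.foldl_cons, List.filterMap_cons]
      cases h : innerScan categoryNames c <;> simp [ih]

-- abbreviation used only in the proofs: B's running max
def maxRank (cats : List String) (a : Nat) : Nat :=
  cats.foldl (fun m category => Nat.max m (rankOf category)) a

theorem maxRank_ge_init (cats : List String) (a : Nat) : a ≤ maxRank cats a := by
  induction cats generalizing a with
  | nil => simp [maxRank]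
  | cons c rest ih =>
      simp only [maxRank, List.foldl_cons] at *
      exact le_trans (Nat.le_max_left _ _) (ih _)

theorem maxRank_ge_mem (cats : List String) (a : Nat) (c : String) (hc : c ∈ cats) :
    rankOf c ≤ maxRank cats a := by
  induction cats generalizing a with
  | nil => simp at hc
  | cons d rest ih =>
      simp only [maxRank, List.foldl_cons] at *
      rcases List.mem_cons.mp hc with h | h
      · subst h; exact le_trans (Nat.le_max_right _ _) (maxRank_ge_init rest _)
      · exact ih _ h

theorem maxRank_attained (cats : List String) (a : Nat) :
    maxRank cats a = a ∨ ∃ c ∈ cats, rankOf c = maxRank cats a := by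
  induction cats generalizing a with
  | nil => left; simp [maxRank]
  | cons d rest ih =>
      simp only [maxRank, List.foldl_cons] at *
      rcases ih (Nat.max a (rankOf d)) with h | ⟨c, hc, h⟩
      · rcases Nat.le_total (rankOf d) a with hm | hm
        · left; rw [h]; exact Nat.max_eq_left hm
        · right; exact ⟨d, List.mem_cons_self .., by rw [h]; exact (Nat.max_eq_right hm).symm⟩
      · right; exact ⟨c, List.mem_cons_of_mem _ hc, h⟩

theorem maxRank_le3 (cats : List String) (a : Nat) (ha : a ≤ 3) : maxRank cats a ≤ 3 := by
  induction cats generalizing a with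
  | nil => simpa [maxRank]
  | cons c rest ih =>
      simp only [maxRank, List.foldl_cons] at *
      exact ih _ (Nat.max_le.mpr ⟨ha, rankOf_le3 c⟩)

theorem rankOpt_inj (m n : Nat) (s : String) (hm : rankOpt m = some s)
    (hn : rankOpt n = some s) : m = n := by
  rcases (rankOpt_eq_some _ _).mp hm with ⟨h1, h2⟩ | ⟨h1, h2⟩ | ⟨h1, h2⟩ <;>
    rcases (rankOpt_eq_some _ _).mp hn with ⟨g1, g2⟩ | ⟨g1, g2⟩ | ⟨g1, g2⟩ <;>
      first | omega | exact absurd (h2.symm.trans g2) (by decide)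

-- membership of a level in risk_levels ↔ some category has the corresponding rank
theorem contains_iff (cats : List String) (n : Nat) (s : String)
    (hs : rankOpt n = some s) :
    ((cats.filterMap (fun c => innerScan categoryNames c)).contains s = true) ↔
      ∃ c ∈ cats, rankOf c = n := by
  simp only [List.contains_iff_mem, List.mem_filterMap, innerScan_eq]
  constructor
  · rintro ⟨c, hc, h⟩
    exact ⟨c, hc, rankOpt_inj _ _ s h hs⟩
  · rintro ⟨c, hc, h⟩; exact ⟨c, hc, by rw [h, hs]⟩

-- ===== VERDICT (by name: the statement is the Claim_ definition above) =====
theorem get_highest_risk_level_py_spec : Claim_equal_get_highest_risk_level_py := by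
  intro cats _
  show get_highest_risk_level_py cats = get_highest_risk_level_py_alt cats
  unfold get_highest_risk_level_py get_highest_risk_level_py_alt
  rcases eq_or_ne cats [] with rfl | hne
  · rfl
  · simp only [if_neg hne, riskLevels_eq, List.nil_append]
    rw [show List.foldl (fun m category => Nat.max m (rankOf category)) 0 cats
          = maxRank cats 0 from rfl]
    have hM3 : maxRank cats 0 ≤ 3 := maxRank_le3 cats 0 (by omega)
    have hhigh := contains_iff cats 3 "high_risk" rfl
    have hmed := contains_iff cats 2 "medium_risk" rfl
    have hlow := contains_iff cats 1 "low_risk" rfl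
    have hub : ∀ c ∈ cats, rankOf c ≤ maxRank cats 0 := fun c hc => maxRank_ge_mem cats 0 c hc
    have hat : maxRank cats 0 = 0 ∨ ∃ c ∈ cats, rankOf c = maxRank cats 0 := maxRank_attained cats 0
    set M := maxRank cats 0 with hMdef
    interval_cases M
    · -- M = 0 : no category matched at any level
      have h3 : ¬ ∃ c ∈ cats, rankOf c = 3 := by
        rintro ⟨c, hc, h⟩; have := hub c hc; omega
      have h2 : ¬ ∃ c ∈ cats, rankOf c = 2 := by
        rintro ⟨c, hc, h⟩; have := hub c hc; omega
      have h1 : ¬ ∃ c ∈ cats, rankOf c = 1 := by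
        rintro ⟨c, hc, h⟩; have := hub c hc; omega
      rw [if_neg (fun hcon => h3 (hhigh.mp hcon)), if_neg (fun hcon => h2 (hmed.mp hcon)),
          if_neg (fun hcon => h1 (hlow.mp hcon))]
      rfl
    · -- M = 1
      have h3 : ¬ ∃ c ∈ cats, rankOf c = 3 := by
        rintro ⟨c, hc, h⟩; have := hub c hc; omega
      have h2 : ¬ ∃ c ∈ cats, rankOf c = 2 := by
        rintro ⟨c, hc, h⟩; have := hub c hc; omega
      have h1 : ∃ c ∈ cats, rankOf c = 1 := by
        rcases hat with h0 | ⟨d, hd, hdm⟩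
        · omega
        · exact ⟨d, hd, by omega⟩
      rw [if_neg (fun hcon => h3 (hhigh.mp hcon)), if_neg (fun hcon => h2 (hmed.mp hcon)),
          if_pos (hlow.mpr h1)]
      rfl
    · -- M = 2
      have h3 : ¬ ∃ c ∈ cats, rankOf c = 3 := by
        rintro ⟨c, hc, h⟩; have := hub c hc; omega
      have h2 : ∃ c ∈ cats, rankOf c = 2 := by
        rcases hat with h0 | ⟨d, hd, hdm⟩
        · omega
        · exact ⟨d, hd, by omega⟩
      rw [if_neg (fun hcon => h3 (hhigh.mp hcon)), if_pos (hmed.mpr h2)]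
      rfl
    · -- M = 3
      have h3 : ∃ c ∈ cats, rankOf c = 3 := by
        rcases hat with h0 | ⟨d, hd, hdm⟩
        · omega
        · exact ⟨d, hd, by omega⟩
      rw [if_pos (hhigh.mpr h3)]
      rfl
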